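-- pv_equiv track=rewrite | github.com/nishchalsen/Cinema-management-system | Cinema/Customer/C_Seats.py | seating_layout_list
-- ===== SOURCE A (Python) =====
-- def seating_layout_list(string_layout):
--     structure = []
--     level = []
--     for i in string_layout:
--         if i == "\n":
--             structure.append(level)
--             level = []
--         elif i == "0":
--             level.append(0)
--         elif i == "1":
--             level.append(1)
--         else:
--             level.append(2)
--     structure.append(level)
--
--     return structure
-- ===== SOURCE B (Python) =====
-- def seating_layout_list(string_layout):
--     # staged algorithm: build a translation table from the DISTINCT characters,
--     # normalise every non-'0'/'1'/newline character to '2' in one translate pass,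
--     # split on newlines, then decode each row by character code
--     table = {ord(c): "2" for c in set(string_layout) if c not in "01\n"}
--     return [[ord(c) - 48 for c in line]
--             for line in string_layout.translate(table).split("\n")]
-- ===== Notes on version B (the rewrite author's own statement) =====
-- stated objective: alternative
-- what changed: Replaces A's single-pass character state machine (mutable level buffer flushed at newlines) by a staged pipeline: build a translation table from the distinct characters, normalise every character that is not a seat digit or a newline with str.translate, split on newlines, then decode each row by character code.
import Mathlib
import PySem

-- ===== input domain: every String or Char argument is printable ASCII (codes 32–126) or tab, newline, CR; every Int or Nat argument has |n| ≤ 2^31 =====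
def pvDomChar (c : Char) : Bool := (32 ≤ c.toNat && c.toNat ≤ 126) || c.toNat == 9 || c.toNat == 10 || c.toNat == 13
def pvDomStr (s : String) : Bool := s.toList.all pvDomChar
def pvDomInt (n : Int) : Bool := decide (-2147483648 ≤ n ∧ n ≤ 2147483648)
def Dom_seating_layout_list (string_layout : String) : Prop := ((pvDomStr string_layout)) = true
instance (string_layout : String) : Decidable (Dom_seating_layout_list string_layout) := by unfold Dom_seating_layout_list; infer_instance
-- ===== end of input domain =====

-- B replaces A's character state machine by a staged pipeline: distinct-character
-- translation table, translate, split on newlines, decode each row by character code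
-- (objective: alternative).

-- ===== PORT A =====
-- literal transliteration: one forward pass, flushing `level` at each newline and after the loop
def seating_layout_list (string_layout : String) : List (List Int) :=
  let p := string_layout.toList.foldl
    (fun (p : List (List Int) × List Int) i =>
      if i = '\n' then (p.1 ++ [p.2], [])
      else if i = '0' then (p.1, p.2 ++ [(0 : Int)])
      else if i = '1' then (p.1, p.2 ++ [(1 : Int)])
      else (p.1, p.2 ++ [(2 : Int)]))
    ([], [])
  p.1 ++ [p.2]

-- ===== PORT B =====
-- table = {ord(c): "2" for c in set(string_layout) if c not in "01\n"}
-- (the value "2" is a one-character string in Python; stored as the Char '2' here)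
-- then translate (per-char table lookup, keep the char on a miss), split("\n"),
-- and decode each row char by ord(c) - 48
def seating_layout_list_alt (string_layout : String) : List (List Int) :=
  let table : PySem.Dict Int Char :=
    (PySem.Set.ofList string_layout.toList).foldl
      (fun d c => if c ∈ ['0', '1', '\n'] then d else d.insert (c.toNat : Int) '2')
      PySem.Dict.empty
  let translated := string_layout.toList.map (fun c => (table.get? (c.toNat : Int)).getD c)
  (PySem.Chars.splitOn translated ['\n']).map (fun line => line.map (fun c => (c.toNat : Int) - 48))

-- ===== PRECONDITION & SPEC =====
def Spec_seating_layout_list (string_layout : String) (out : List (List Int)) : Prop := out = seating_layout_list_alt string_layout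
instance (string_layout : String) (out : List (List Int)) : Decidable (Spec_seating_layout_list string_layout out) := by unfold Spec_seating_layout_list; infer_instance

-- ===== CLAIM (what is proved, stated in full; the proofs are below) =====
def Claim_equal_seating_layout_list : Prop := ∀ (string_layout : String), Dom_seating_layout_list string_layout → Spec_seating_layout_list string_layout (seating_layout_list string_layout)

-- ===== LEMMAS AND PROOFS =====

-- proof-side name for A's loop body
def pvStepA (p : List (List Int) × List Int) (i : Char) : List (List Int) × List Int :=
  if i = '\n' then (p.1 ++ [p.2], [])
  else if i = '0' then (p.1, p.2 ++ [(0 : Int)])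
  else if i = '1' then (p.1, p.2 ++ [(1 : Int)])
  else (p.1, p.2 ++ [(2 : Int)])

def pvSeatVal (c : Char) : Int := if c = '0' then 0 else if c = '1' then 1 else 2

-- the canonical result as a structural recursion on the characters (proof-side middleman)
def pvStepB (st : List (List Int)) (c : Char) : List (List Int) :=
  if c = '\n' then [] :: st
  else
    match st with
    | h :: t => (pvSeatVal c :: h) :: t
    | [] => [[pvSeatVal c]]

def pvAltGo : List Char → List (List Int)
  | [] => [[]]
  | c :: rest => pvStepB (pvAltGo rest) c

theorem pvAltGo_ne_nil (cs : List Char) : pvAltGo cs ≠ [] := by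
  cases cs with
  | nil => simp [pvAltGo]
  | cons c rest =>
    simp only [pvAltGo, pvStepB]
    cases pvAltGo rest <;> split_ifs <;> simp

-- glue a pending level onto the head row of a block list
def pvConsHead (lv : List Int) : List (List Int) → List (List Int)
  | [] => [lv]
  | h :: t => (lv ++ h) :: t

-- A's fold, finished with the trailing append, equals the canonical recursion
theorem pvFold_eq (cs : List Char) : ∀ (st : List (List Int)) (lv : List Int),
    (cs.foldl pvStepA (st, lv)).1 ++ [(cs.foldl pvStepA (st, lv)).2]
      = st ++ pvConsHead lv (pvAltGo cs) := by
  induction cs with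
  | nil => intro st lv; simp [pvAltGo, pvConsHead]
  | cons c rest ih =>
    intro st lv
    by_cases hc : c = '\n'
    · subst hc
      rw [List.foldl_cons, show pvStepA (st, lv) '\n' = (st ++ [lv], []) from by simp [pvStepA],
        ih (st ++ [lv]) []]
      cases h : pvAltGo rest with
      | nil => exact absurd h (pvAltGo_ne_nil rest)
      | cons a b => simp [pvAltGo, pvStepB, h, pvConsHead]
    · have hstep : pvStepA (st, lv) c = (st, lv ++ [pvSeatVal c]) := by
        by_cases h0 : c = '0'
        · simp [pvStepA, pvSeatVal, h0, hc]
        · by_cases h1 : c = '1' <;> simp [pvStepA, pvSeatVal, h0, h1, hc]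
      rw [List.foldl_cons, hstep, ih st (lv ++ [pvSeatVal c])]
      cases h : pvAltGo rest with
      | nil => exact absurd h (pvAltGo_ne_nil rest)
      | cons a b => simp [pvAltGo, pvStepB, h, hc, pvConsHead, pvSeatVal]

-- proof-side characterisation of splitting on '\n'; `cur` is the reversed current chunk
def pvBlocks (cur l : List Char) : List (List Char) :=
  match l with
  | [] => [cur.reverse]
  | c :: rest => if c = '\n' then cur.reverse :: pvBlocks [] rest else pvBlocks (c :: cur) rest

theorem pvGo_eq (l : List Char) : ∀ (fuel : Nat) (cur : List Char) (acc : List (List Char)),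
    l.length ≤ fuel →
    PySem.Chars.splitOn.go ['\n'] fuel l cur acc = acc.reverse ++ pvBlocks cur l := by
  induction l with
  | nil =>
    intro fuel cur acc _
    cases fuel <;> simp [PySem.Chars.splitOn.go, pvBlocks]
  | cons c rest ih =>
    intro fuel cur acc h
    cases fuel with
    | zero => simp at h
    | succ f =>
      by_cases hc : c = '\n'
      · subst hc
        have hp : (['\n'].isPrefixOf ('\n' :: rest)) = true := by simp [List.isPrefixOf]
        simp only [PySem.Chars.splitOn.go, hp, if_true, List.length_cons, List.drop_succ_cons,
          List.length_nil, List.drop_zero, pvBlocks]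
        rw [ih f [] (cur.reverse :: acc) (by simpa using Nat.le_of_succ_le_succ h)]
        simp
      · have hp : (['\n'].isPrefixOf (c :: rest)) = false := by
          simp [List.isPrefixOf]; exact fun h' => absurd h'.symm hc
        simp only [PySem.Chars.splitOn.go, hp, Bool.false_eq_true, if_false, pvBlocks, hc]
        exact ih f (c :: cur) acc (by simpa using Nat.le_of_succ_le_succ h)

theorem pvSplitOn_eq (cs : List Char) :
    PySem.Chars.splitOn cs ['\n'] = pvBlocks [] cs := by
  unfold PySem.Chars.splitOn
  rw [pvGo_eq cs (cs.length + 1) [] [] (Nat.le_succ _)]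
  simp

-- the translation table built from any character list answers membership-and-filter
def pvTblStep (d : PySem.Dict Int Char) (c : Char) : PySem.Dict Int Char :=
  if c ∈ ['0', '1', '\n'] then d else d.insert (c.toNat : Int) '2'

theorem pvTable_get? (L : List Char) (k : Int) : ∀ (d : PySem.Dict Int Char),
    (L.foldl pvTblStep d).get? k
      = if (∃ c ∈ L, c ∉ (['0', '1', '\n'] : List Char) ∧ (c.toNat : Int) = k)
        then some '2' else d.get? k := by
  induction L with
  | nil => intro d; simp
  | cons c rest ih =>
    intro d
    rw [List.foldl_cons, ih (pvTblStep d c)]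
    by_cases hkeep : c ∈ (['0', '1', '\n'] : List Char)
    · simp only [pvTblStep, hkeep, if_true]
      by_cases hex : (∃ x ∈ rest, x ∉ (['0', '1', '\n'] : List Char) ∧ (x.toNat : Int) = k)
      · rw [if_pos hex, if_pos]
        exact ⟨hex.choose, List.mem_cons_of_mem _ hex.choose_spec.1, hex.choose_spec.2⟩
      · rw [if_neg hex, if_neg]
        rintro ⟨x, hx, hxk⟩
        rcases List.mem_cons.mp hx with rfl | hx'
        · exact hxk.1 hkeep
        · exact hex ⟨x, hx', hxk⟩
    · simp only [pvTblStep, hkeep, if_false]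
      by_cases hex : (∃ x ∈ rest, x ∉ (['0', '1', '\n'] : List Char) ∧ (x.toNat : Int) = k)
      · rw [if_pos hex, if_pos]
        exact ⟨hex.choose, List.mem_cons_of_mem _ hex.choose_spec.1, hex.choose_spec.2⟩
      · rw [if_neg hex]
        by_cases hk : (c.toNat : Int) = k
        · rw [if_pos ⟨c, List.mem_cons_self, hkeep, hk⟩, ← hk, PySem.Dict.get?_insert_self]
        · rw [if_neg, PySem.Dict.get?_insert_of_ne d '2' (fun h => hk h.symm)]
          rintro ⟨x, hx, hxk⟩
          rcases List.mem_cons.mp hx with rfl | hx'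
          · exact hk hxk.2
          · exact hex ⟨x, hx', hxk⟩

-- on a character OF the string, the translate lookup yields the canonical normalisation
theorem pvTranslate_char (s : List Char) (c : Char) (hc : c ∈ s) :
    (((PySem.Set.ofList s).foldl pvTblStep PySem.Dict.empty).get? (c.toNat : Int)).getD c
      = if c ∈ (['0', '1', '\n'] : List Char) then c else '2' := by
  rw [pvTable_get?]
  by_cases hkeep : c ∈ (['0', '1', '\n'] : List Char)
  · rw [if_neg, if_pos hkeep]
    · simp
    · rintro ⟨x, hx, hxn, hxk⟩
      have : x = c := Char.ext (UInt32.toNat_inj.mp (by exact_mod_cast hxk))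
      exact hxn (this ▸ hkeep)
  · rw [if_pos ⟨c, (PySem.Set.mem_ofList s c).mpr hc, hkeep, rfl⟩, if_neg hkeep]
    simp

-- decoding the normalised char by code recovers the seat value
theorem pvDecode_norm (c : Char) :
    ((if c ∈ (['0', '1', '\n'] : List Char) then c else '2').toNat : Int) - 48
      = if c = '\n' then ('\n'.toNat : Int) - 48 else pvSeatVal c := by
  by_cases h0 : c = '0'
  · simp [h0, pvSeatVal]
  · by_cases h1 : c = '1'
    · simp [h1, pvSeatVal]
    · by_cases hn : c = '\n' <;> simp [h0, h1, hn, pvSeatVal]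

-- splitting the normalised characters and decoding each row equals the canonical recursion
theorem pvBlocks_decode (cs : List Char) (f : Char → Char) (h : Char → Int)
    (hf : ∀ c ∈ cs, f c = '\n' ↔ c = '\n')
    (hv : ∀ c ∈ cs, c ≠ '\n' → h (f c) = pvSeatVal c) :
    ∀ (cur : List Char) (lv : List Int), lv = cur.reverse.map h →
    (pvBlocks cur (cs.map f)).map (fun line => line.map h) = pvConsHead lv (pvAltGo cs) := by
  induction cs with
  | nil =>
    intro cur lv hlv
    simp [pvBlocks, pvAltGo, pvConsHead, hlv]
  | cons c rest ih =>
    intro cur lv hlv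
    have hf' : ∀ x ∈ rest, f x = '\n' ↔ x = '\n' := fun x hx => hf x (List.mem_cons_of_mem _ hx)
    have hv' : ∀ x ∈ rest, x ≠ '\n' → h (f x) = pvSeatVal x :=
      fun x hx => hv x (List.mem_cons_of_mem _ hx)
    by_cases hc : c = '\n'
    · have hfc : f c = '\n' := (hf c List.mem_cons_self).mpr hc
      rw [List.map_cons, show pvBlocks cur (f c :: rest.map f) = cur.reverse :: pvBlocks [] (rest.map f) from by
        simp [pvBlocks, hfc], List.map_cons,
        ih hf' hv' [] [] (by simp)]
      cases hrest : pvAltGo rest with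
      | nil => exact absurd hrest (pvAltGo_ne_nil rest)
      | cons a b =>
        simp [pvAltGo, pvStepB, hc, hrest, pvConsHead, hlv]
    · have hfc : f c ≠ '\n' := fun h' => hc ((hf c List.mem_cons_self).mp h')
      rw [List.map_cons, show pvBlocks cur (f c :: rest.map f) = pvBlocks (f c :: cur) (rest.map f) from by
        simp [pvBlocks, hfc],
        ih hf' hv' (f c :: cur) (lv ++ [h (f c)]) (by simp [hlv])]
      cases hrest : pvAltGo rest with
      | nil => exact absurd hrest (pvAltGo_ne_nil rest)
      | cons a b =>
        simp [pvAltGo, pvStepB, hc, hrest, pvConsHead, hv c List.mem_cons_self hc]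

-- ===== VERDICT (by name: the statement is the Claim_ definition above) =====
theorem seating_layout_list_spec : Claim_equal_seating_layout_list := by
  intro s _
  unfold Spec_seating_layout_list seating_layout_list seating_layout_list_alt
  show (s.toList.foldl pvStepA ([], [])).1 ++ [(s.toList.foldl pvStepA ([], [])).2] = _
  rw [pvFold_eq s.toList [] []]
  rw [show (fun (d : PySem.Dict Int Char) (c : Char) =>
        if c ∈ ['0', '1', '\n'] then d else d.insert (c.toNat : Int) '2') = pvTblStep from rfl]
  -- rewrite the per-char translate lookup to a pure function of the char, on chars of s
  have htr : s.toList.map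
        (fun c => (((PySem.Set.ofList s.toList).foldl pvTblStep PySem.Dict.empty).get?
          (c.toNat : Int)).getD c)
      = s.toList.map (fun c => if c ∈ (['0', '1', '\n'] : List Char) then c else '2') :=
    List.map_congr_left (fun c hc => pvTranslate_char s.toList c hc)
  show pvConsHead [] (pvAltGo s.toList)
      = (PySem.Chars.splitOn (s.toList.map _) ['\n']).map _
  rw [htr, pvSplitOn_eq,
    pvBlocks_decode s.toList _ _
      (fun c _ => by
        by_cases h0 : c = '0' <;> by_cases h1 : c = '1' <;> by_cases hn : c = '\n' <;>
          simp_all)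
      (fun c _ hcn => by
        rw [pvDecode_norm, if_neg hcn])
      [] [] (by simp)]
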